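-- pv_equiv track=rewrite | github.com/teake16/MSW-WordFreqCheck | word_freq_check.py | delimitStringToList
-- ===== SOURCE A (Python) =====
-- def delimitStringToList(s):
--     FIRST_ELT = " "
--     l = [FIRST_ELT]
--     l.clear()
--     tmpStr = ""
--     for char in s:
--         if isRunonPunctuation(char) or isMiscPunctuation(char) or char == " ":
--             if tmpStr != "":
--                 l.append(tmpStr)
--             tmpStr = ""
--         elif char == "\n":
--             if tmpStr != "":
--                 l.append(tmpStr)
--             l.append(char)
--             tmpStr = ""
--         else:
--             tmpStr += char
--     if tmpStr != "":
--         l.append(tmpStr)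
--     return l
--
-- def isRunonPunctuation(c):
--     return c == "," or c == "\t" or c == ':'
--
-- def isMiscPunctuation(c):
--     return c == "\"" or c == "(" or c == ")"
-- ===== SOURCE B (Python) =====
-- import re
--
-- def delimitStringToList(s):
--     # One regex pass: a token is either a lone newline (kept as its own "\n"
--     # element) or a maximal run of non-delimiter characters; delimiters
--     # (comma, tab, colon, double-quote, parens, space) are skipped.
--     return re.findall(r'\n|[^,\t:"() \n]+', s)
-- ===== Notes on version B (the rewrite author's own statement) =====
-- stated objective: idiomatic
-- what changed: Replaced the explicit character-by-character state machine with accumulator and flush logic by a single regex findall whose alternation matches a lone newline or a maximal run of non-delimiter characters; the scan runs in the regex engine's compiled loop instead of Python bytecode.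
import Mathlib
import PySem

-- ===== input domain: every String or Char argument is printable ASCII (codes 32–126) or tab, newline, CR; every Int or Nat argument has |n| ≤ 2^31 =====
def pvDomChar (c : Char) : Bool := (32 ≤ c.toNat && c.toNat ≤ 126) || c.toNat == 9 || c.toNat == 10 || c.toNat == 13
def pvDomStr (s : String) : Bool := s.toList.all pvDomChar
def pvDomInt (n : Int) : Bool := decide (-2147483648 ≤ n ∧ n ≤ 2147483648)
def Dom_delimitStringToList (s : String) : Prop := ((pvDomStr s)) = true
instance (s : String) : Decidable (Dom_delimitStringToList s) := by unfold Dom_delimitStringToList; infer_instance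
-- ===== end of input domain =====

-- B replaces A's manual accumulator/flush state machine by a single regex pass
-- (lone newline | maximal run of non-delimiter chars); same return value, idiomatic.

-- ===== PORT A =====
def pyRunon (c : Char) : Bool := c = ',' || c = '\t' || c = ':'
def pyMisc (c : Char) : Bool := c = '"' || c = '(' || c = ')'

-- tmpStr is carried as its list of characters; 'tmpStr != ""' is 't ≠ []'.
def aStep (st : List String × List Char) (c : Char) : List String × List Char :=
  let (l, t) := st
  if pyRunon c || pyMisc c || c = ' ' then
    ((if t ≠ [] then l ++ [String.mk t] else l), [])
  else if c = '\n' then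
    ((if t ≠ [] then l ++ [String.mk t] else l) ++ ["\n"], [])
  else (l, t ++ [c])

def delimitStringToList (s : String) : List String :=
  -- l = [FIRST_ELT]; l.clear()  ⇒  l starts empty
  let r := s.toList.foldl aStep ([], [])
  if r.2 ≠ [] then r.1 ++ [String.mk r.2] else r.1

-- ===== PORT B =====
-- character class [^,\t:"() \n] of B's regex
def tokChar (c : Char) : Bool :=
  !(c = ',' || c = '\t' || c = ':' || c = '"' || c = '(' || c = ')' || c = ' ' || c = '\n')

-- re.findall(r'\n|[^,\t:"() \n]+', s): emit '\n', or a maximal run of token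
-- chars (takeWhile), skipping delimiters between matches.
def altTokens : List Char → List String
  | [] => []
  | c :: rest =>
    if c = '\n' then "\n" :: altTokens rest
    else if tokChar c then
      String.mk (c :: rest.takeWhile tokChar) :: altTokens (rest.dropWhile tokChar)
    else altTokens rest
termination_by l => l.length
decreasing_by
  · simp
  · exact Nat.lt_succ_of_le (List.length_dropWhile_le _ _)
  · simp

def delimitStringToList_alt (s : String) : List String := altTokens s.toList

-- ===== PRECONDITION & SPEC =====
def Spec_delimitStringToList (s : String) (out : List String) : Prop := out = delimitStringToList_alt s
instance (s : String) (out : List String) : Decidable (Spec_delimitStringToList s out) := by unfold Spec_delimitStringToList; infer_instance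

-- ===== CLAIM (what is proved, stated in full; the proofs are below) =====
def Claim_equal_delimitStringToList : Prop := ∀ (s : String), Dom_delimitStringToList s → Spec_delimitStringToList s (delimitStringToList s)

-- ===== LEMMAS AND PROOFS =====

-- What A's loop contributes after the current point, given pending accumulator t.
def emitA : List Char → List Char → List String
  | t, [] => if t ≠ [] then [String.mk t] else []
  | t, c :: cs =>
    if pyRunon c || pyMisc c || c = ' ' then
      (if t ≠ [] then [String.mk t] else []) ++ emitA [] cs
    else if c = '\n' then
      (if t ≠ [] then [String.mk t] else []) ++ "\n" :: emitA [] cs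
    else emitA (t ++ [c]) cs

lemma foldl_emitA (cs : List Char) : ∀ (l : List String) (t : List Char),
    (if (cs.foldl aStep (l, t)).2 ≠ [] then
       (cs.foldl aStep (l, t)).1 ++ [String.mk (cs.foldl aStep (l, t)).2]
     else (cs.foldl aStep (l, t)).1) = l ++ emitA t cs := by
  induction cs with
  | nil => intro l t; by_cases h : t = [] <;> simp [emitA, h]
  | cons c cs ih =>
    intro l t
    simp only [List.foldl_cons, aStep, emitA]
    by_cases h1 : (pyRunon c || pyMisc c || c = ' ') = true
    · by_cases h2 : t = [] <;> simp [h1, h2, ih, List.append_assoc]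
    · by_cases h2 : c = '\n'
      · subst h2
        have hb : (pyRunon '\n' || pyMisc '\n' || decide ('\n' = ' ')) = false := by decide
        by_cases h3 : t = [] <;> simp [pyRunon, pyMisc, h3, ih, List.append_assoc]
      · simp [h1, h2, ih]

lemma tokChar_iff (c : Char) :
    tokChar c = (!(pyRunon c || pyMisc c || c = ' ') && !(c = '\n')) := by
  simp [tokChar, pyRunon, pyMisc, Bool.and_assoc]

lemma emitA_altTokens (cs : List Char) :
    (∀ t, t ≠ [] →
      emitA t cs = String.mk (t ++ cs.takeWhile tokChar) :: altTokens (cs.dropWhile tokChar))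
    ∧ emitA [] cs = altTokens cs := by
  induction cs with
  | nil =>
    constructor
    · intro t ht; simp [emitA, altTokens, ht]
    · simp [emitA, altTokens]
  | cons c cs ih =>
    have htok := tokChar_iff c
    constructor
    · intro t ht
      by_cases h1 : (pyRunon c || pyMisc c || c = ' ') = true
      · have hc : tokChar c = false := by rw [htok]; simp [h1]
        have hne : ¬ c = '\n' := by
          intro h; subst h; simp [pyRunon, pyMisc] at h1
        simp [emitA, h1, altTokens, hc, hne, ih.2, ht, List.takeWhile, List.dropWhile]
      · by_cases h2 : c = '\n'
        · have hc : tokChar c = false := by rw [htok]; simp [h2]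
          subst h2
          simp [emitA, pyRunon, pyMisc, altTokens, hc, ih.2, ht, List.takeWhile, List.dropWhile]
        · have hc : tokChar c = true := by rw [htok]; simp [h1, h2]
          have he : emitA t (c :: cs) = emitA (t ++ [c]) cs := by
            simp [emitA, h1, h2]
          rw [he, ih.1 (t ++ [c]) (by simp)]
          simp [altTokens, hc, List.takeWhile, List.dropWhile, List.append_assoc]
    · by_cases h1 : (pyRunon c || pyMisc c || c = ' ') = true
      · have hc : tokChar c = false := by rw [htok]; simp [h1]
        have hne : ¬ c = '\n' := by
          intro h; subst h; simp [pyRunon, pyMisc] at h1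
        simp [emitA, h1, altTokens, hc, hne, ih.2]
      · by_cases h2 : c = '\n'
        · subst h2
          simp [emitA, pyRunon, pyMisc, altTokens, ih.2]
        · have hc : tokChar c = true := by rw [htok]; simp [h1, h2]
          have he : emitA [] (c :: cs) = emitA [c] cs := by
            simp [emitA, h1, h2]
          rw [he, ih.1 [c] (by simp)]
          simp [altTokens, hc, h2]


-- ===== VERDICT (by name: the statement is the Claim_ definition above) =====
theorem delimitStringToList_spec : Claim_equal_delimitStringToList := by
  intro s _
  unfold Spec_delimitStringToList delimitStringToList delimitStringToList_alt
  rw [foldl_emitA s.toList [] []]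
  simp [(emitA_altTokens s.toList).2]
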